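-- pv_equiv track=rewrite | github.com/Oyu11/AI | spam.py | create_bag_of_words
-- ===== SOURCE A (Python) =====
-- def create_bag_of_words(emails):
--     word_count = {}
--     labels = []
--
--     for email, label in emails:
--         words = email.lower().split()  # И-мэйлыг жижиг үсгээр болгож, үгсэд хуваана
--         labels.append(label)
--
--         for word in words:
--             if word not in word_count:
--                 word_count[word] = [0, 0]  # [spam-д орсон тоо, ham-д орсон тоо]
--             if label == 'spam':
--                 word_count[word][0] += 1
--             else:
--                 word_count[word][1] += 1
--
--     return word_count, labels
-- ===== SOURCE B (Python) =====
-- def create_bag_of_words(emails):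
--     labels = [label for _, label in emails]
--
--     # split the word stream by class in one pass
--     spam_words = []
--     ham_words = []
--     for email, label in emails:
--         (spam_words if label == 'spam' else ham_words).extend(email.lower().split())
--
--     # count each class separately
--     spam_count = {}
--     for w in spam_words:
--         spam_count[w] = spam_count.get(w, 0) + 1
--     ham_count = {}
--     for w in ham_words:
--         ham_count[w] = ham_count.get(w, 0) + 1
--
--     # merge, keyed in first-occurrence order of the full word stream
--     order = dict.fromkeys(w for email, _ in emails for w in email.lower().split())
--     word_count = {w: [spam_count.get(w, 0), ham_count.get(w, 0)] for w in order}
--     return word_count, labels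
-- ===== Notes on version B (the rewrite author's own statement) =====
-- stated objective: alternative
-- what changed: A updates one dict of mutable [spam,ham] pair-lists inside a nested per-word branch; B instead splits the word stream into per-class lists in one pass, counts each class in its own counter dict, and builds word_count in a final merge pass over the first-occurrence order of the full word stream.
import Mathlib
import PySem

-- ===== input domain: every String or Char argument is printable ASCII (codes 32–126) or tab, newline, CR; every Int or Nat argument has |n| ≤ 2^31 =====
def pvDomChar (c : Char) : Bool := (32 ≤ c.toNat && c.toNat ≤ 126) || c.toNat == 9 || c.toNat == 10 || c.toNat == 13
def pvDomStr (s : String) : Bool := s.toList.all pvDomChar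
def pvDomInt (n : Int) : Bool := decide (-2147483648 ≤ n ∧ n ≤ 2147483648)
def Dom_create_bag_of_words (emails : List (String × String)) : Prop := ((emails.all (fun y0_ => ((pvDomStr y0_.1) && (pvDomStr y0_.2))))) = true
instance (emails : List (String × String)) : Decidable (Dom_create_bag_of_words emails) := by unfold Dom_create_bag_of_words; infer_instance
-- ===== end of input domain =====

-- B replaces A's nested in-place dict update by per-class word lists, two counter
-- dicts, and a final merge in first-occurrence order (alternative decomposition,
-- same asymptotic cost); return values proved identical on the whole domain.

-- ===== PORT A =====
-- word_count[word][0] += 1  (list index read + write, Python-exact on the always-present index)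
def pvBump0 (l : List Int) : List Int := PySem.List.pySetD l 0 (PySem.List.pyGetD l 0 0 + 1)
def pvBump1 (l : List Int) : List Int := PySem.List.pySetD l 1 (PySem.List.pyGetD l 1 0 + 1)

def create_bag_of_words (emails : List (String × String)) : (List (String × List Int)) × List String :=
  let r := emails.foldl (fun (st : PySem.Dict String (List Int) × List String) el =>
      let words := PySem.Str.split₀ (PySem.Str.lower el.1)
      let labels := st.2 ++ [el.2]
      let wc := words.foldl (fun wc w =>
          let wc1 := if wc.contains w then wc else wc.insert w [0, 0]
          if el.2 == "spam" then wc1.modify w [] pvBump0 else wc1.modify w [] pvBump1) st.1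
      (wc, labels))
    (PySem.Dict.empty, [])
  (r.1.items, r.2)

-- ===== PORT B =====
def create_bag_of_words_alt (emails : List (String × String)) : (List (String × List Int)) × List String :=
  let labels := emails.map (fun el => el.2)
  let swhw := emails.foldl (fun (p : List String × List String) el =>
      let ws := PySem.Str.split₀ (PySem.Str.lower el.1)
      if el.2 == "spam" then (p.1 ++ ws, p.2) else (p.1, p.2 ++ ws)) ([], [])
  let spamC := swhw.1.foldl (fun d w => d.insert w (d.getD w 0 + 1)) PySem.Dict.empty
  let hamC := swhw.2.foldl (fun d w => d.insert w (d.getD w 0 + 1)) PySem.Dict.empty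
  -- dict.fromkeys over the word stream = first-occurrence dedup (PySem.List.dedup)
  let order := PySem.List.dedup (emails.flatMap (fun el => PySem.Str.split₀ (PySem.Str.lower el.1)))
  let word_count := order.map (fun w => (w, [spamC.getD w 0, hamC.getD w 0]))
  (word_count, labels)

-- ===== PRECONDITION & SPEC =====
def Spec_create_bag_of_words (emails : List (String × String)) (out : (List (String × List Int)) × List String) : Prop := out = create_bag_of_words_alt emails
instance (emails : List (String × String)) (out : (List (String × List Int)) × List String) : Decidable (Spec_create_bag_of_words emails out) := by unfold Spec_create_bag_of_words; infer_instance

-- ===== CLAIM (what is proved, stated in full; the proofs are below) =====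
def Claim_equal_create_bag_of_words : Prop := ∀ (emails : List (String × String)), Dom_create_bag_of_words emails → Spec_create_bag_of_words emails (create_bag_of_words emails)

-- ===== LEMMAS AND PROOFS =====

-- the lowered/split word list of one email
def pvWords (el : String × String) : List String := PySem.Str.split₀ (PySem.Str.lower el.1)

-- A's inner-loop body on one (word, label) pair
def pvStep (wc : PySem.Dict String (List Int)) (p : String × String) : PySem.Dict String (List Int) :=
  let wc1 := if wc.contains p.1 then wc else wc.insert p.1 [0, 0]
  if p.2 == "spam" then wc1.modify p.1 [] pvBump0 else wc1.modify p.1 [] pvBump1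

-- the flattened (word, label) stream
def pvS (emails : List (String × String)) : List (String × String) :=
  emails.flatMap (fun el => (pvWords el).map (fun w => (w, el.2)))

-- A's fold over emails = fold of pvStep over the flattened stream (plus labels)
lemma pvA_flatten (emails : List (String × String)) :
    ∀ (d : PySem.Dict String (List Int)) (L : List String),
    emails.foldl (fun (st : PySem.Dict String (List Int) × List String) el =>
        let words := PySem.Str.split₀ (PySem.Str.lower el.1)
        let labels := st.2 ++ [el.2]
        let wc := words.foldl (fun wc w =>
            let wc1 := if wc.contains w then wc else wc.insert w [0, 0]
            if el.2 == "spam" then wc1.modify w [] pvBump0 else wc1.modify w [] pvBump1) st.1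
        (wc, labels)) (d, L)
      = ((pvS emails).foldl pvStep d, L ++ emails.map (fun el => el.2)) := by
  induction emails with
  | nil => intro d L; simp [pvS]
  | cons el t ih =>
    intro d L
    simp only [List.foldl_cons, ih, pvS, List.flatMap_cons, List.foldl_append, List.foldl_map]
    refine Prod.ext rfl ?_
    simp

-- A's step on a dict in canonical shape
lemma pvStep_keys (d : PySem.Dict String (List Int)) (w l : String) :
    (pvStep d (w, l)).keys = if d.contains w then d.keys else d.keys ++ [w] := by
  unfold pvStep
  by_cases hc : d.contains w
  · simp only [hc, if_true]
    by_cases hl : (l == "spam")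
    · simp [hl, PySem.Dict.keys_modify, PySem.Dict.keys_insert_of_contains d _ hc]
    · simp [hl, PySem.Dict.keys_modify, PySem.Dict.keys_insert_of_contains d _ hc]
  · simp only [Bool.not_eq_true] at hc
    simp only [hc, Bool.false_eq_true, if_false]
    have h2 : (d.insert w [0,0]).contains w := PySem.Dict.contains_insert_self d w _
    by_cases hl : (l == "spam")
    · simp [hl, PySem.Dict.keys_modify, PySem.Dict.keys_insert_of_contains (d.insert w [0,0]) _ h2,
        PySem.Dict.keys_insert_of_not_contains d _ hc]
    · simp [hl, PySem.Dict.keys_modify, PySem.Dict.keys_insert_of_contains (d.insert w [0,0]) _ h2,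
        PySem.Dict.keys_insert_of_not_contains d _ hc]

lemma pvStep_contains (d : PySem.Dict String (List Int)) (w l k : String) :
    (pvStep d (w, l)).contains k = (k == w || d.contains k) := by
  unfold pvStep
  by_cases hl : (l == "spam") <;>
    by_cases hc : d.contains w <;>
      simp [hl, hc, PySem.Dict.contains_modify, PySem.Dict.contains_insert]

lemma pvStep_getD (d : PySem.Dict String (List Int)) (w l k : String)
    (s h : String → Int)
    (hval : ∀ k, d.contains k = true → d.getD k [] = [s k, h k])
    (habs : ∀ k, d.contains k = false → s k = 0 ∧ h k = 0) :
    (pvStep d (w, l)).getD k [] =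
      if k = w then
        (if l = "spam" then [s w + 1, h w] else [s w, h w + 1])
      else d.getD k [] := by
  have hvw : (if d.contains w then d else d.insert w [0, 0]).getD w [] = [s w, h w] := by
    by_cases hc : d.contains w
    · simp [hc, hval w hc]
    · simp only [Bool.not_eq_true] at hc
      obtain ⟨h1, h2⟩ := habs w hc
      simp [hc, PySem.Dict.getD_insert_self, h1, h2]
  have hvk : k ≠ w → (if d.contains w then d else d.insert w [0, 0]).getD k [] = d.getD k [] := by
    intro hk
    by_cases hc : d.contains w
    · simp [hc]
    · simp [hc, PySem.Dict.getD_insert_of_ne d _ _ hk]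
  unfold pvStep
  by_cases hl : l = "spam"
  · simp only [hl, beq_self_eq_true, if_true]
    by_cases hk : k = w
    · subst hk; simp [PySem.Dict.getD_modify_self, hvw, pvBump0,
        PySem.List.pySetD, PySem.List.pySet?, PySem.List.pyGetD, PySem.List.pyGet?, PySem.List.pyIdx?]
    · simp [hk, PySem.Dict.getD_modify, hvk hk]
  · have hl' : (l == "spam") = false := by simp [hl]
    simp only [hl', Bool.false_eq_true, if_false]
    by_cases hk : k = w
    · subst hk; simp [hl, PySem.Dict.getD_modify_self, hvw, pvBump1,
        PySem.List.pySetD, PySem.List.pySet?, PySem.List.pyGetD, PySem.List.pyGet?, PySem.List.pyIdx?]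
    · simp [hk, PySem.Dict.getD_modify, hvk hk]

lemma pvStep_nodup (d : PySem.Dict String (List Int)) (w l : String)
    (hn : d.keys.Nodup) : (pvStep d (w, l)).keys.Nodup := by
  rw [pvStep_keys]
  by_cases hc : d.contains w
  · simp [hc, hn]
  · simp only [Bool.not_eq_true] at hc
    simp only [hc, Bool.false_eq_true, if_false]
    have hw : w ∉ d.keys := fun hm => by
      simp [(PySem.Dict.contains_iff_mem_keys d w).2 hm] at hc
    refine hn.append (List.nodup_singleton w) ?_
    intro a ha hb
    simp only [List.mem_singleton] at hb
    exact hw (hb ▸ ha)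

-- spam/ham counts of a (word, label) stream
def pvCntS (S : List (String × String)) (k : String) : Nat :=
  (S.filter (fun p => p.1 == k && p.2 == "spam")).length
def pvCntH (S : List (String × String)) (k : String) : Nat :=
  (S.filter (fun p => p.1 == k && !(p.2 == "spam"))).length

-- main invariant: folding pvStep over a stream from a canonical dict
lemma pv_main (S : List (String × String)) :
    ∀ (d : PySem.Dict String (List Int)) (s h : String → Int),
    d.keys.Nodup →
    (∀ k, d.contains k = true → d.getD k [] = [s k, h k]) →
    (∀ k, d.contains k = false → s k = 0 ∧ h k = 0) →
    (S.foldl pvStep d).keys = PySem.Set.update d.keys (S.map Prod.fst)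
    ∧ (S.foldl pvStep d).keys.Nodup
    ∧ ∀ k, (S.foldl pvStep d).contains k = true →
        (S.foldl pvStep d).getD k [] = [s k + (pvCntS S k : Int), h k + (pvCntH S k : Int)] := by
  induction S with
  | nil =>
    intro d s h hn hval habs
    refine ⟨by simp [PySem.Set.update_nil], hn, ?_⟩
    intro k hk
    simpa [pvCntS, pvCntH] using hval k hk
  | cons p t ih =>
    intro d s h hn hval habs
    obtain ⟨w, l⟩ := p
    set d' := pvStep d (w, l) with hd'
    set s' : String → Int := fun k => if k = w ∧ l = "spam" then s k + 1 else s k with hs'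
    set h' : String → Int := fun k => if k = w ∧ l ≠ "spam" then h k + 1 else h k with hh'
    have hn' : d'.keys.Nodup := pvStep_nodup d w l hn
    have hval' : ∀ k, d'.contains k = true → d'.getD k [] = [s' k, h' k] := by
      intro k hk
      rw [hd', pvStep_getD d w l k s h hval habs]
      by_cases hkw : k = w
      · subst hkw
        by_cases hls : l = "spam" <;> simp [hls, hs', hh']
      · have hk' : d.contains k = true := by
          rw [hd', pvStep_contains] at hk
          rcases Bool.or_eq_true_iff.1 hk with h1 | h1
          · exact absurd (by simpa using h1) hkw
          · exact h1
        simp [hkw, hs', hh', hval k hk']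
    have habs' : ∀ k, d'.contains k = false → s' k = 0 ∧ h' k = 0 := by
      intro k hk
      rw [hd', pvStep_contains] at hk
      have hkw : k ≠ w := by
        intro hkw; subst hkw; simp at hk
      have hkc : d.contains k = false := by
        rcases Bool.or_eq_false_iff.1 hk with ⟨_, h2⟩; exact h2
      simp [hs', hh', hkw, habs k hkc]
    obtain ⟨hk1, hk2, hk3⟩ := ih d' s' h' hn' hval' habs'
    refine ⟨?_, by simpa using hk2, ?_⟩
    · -- keys
      have hadd : PySem.Set.add d.keys w = if d.contains w then d.keys else d.keys ++ [w] := by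
        by_cases hc : d.contains w
        · have hm : w ∈ d.keys := (PySem.Dict.contains_iff_mem_keys d w).1 hc
          simp [PySem.Set.add, hm, hc]
        · simp only [Bool.not_eq_true] at hc
          have hm : w ∉ d.keys := fun hm => by
            simp [(PySem.Dict.contains_iff_mem_keys d w).2 hm] at hc
          simp [PySem.Set.add, hm, hc]
      simp only [List.foldl_cons, List.map_cons, PySem.Set.update_cons, ← hd']
      rw [hk1, hadd, hd', pvStep_keys]
    · -- values
      intro k hk
      simp only [List.foldl_cons, ← hd'] at hk ⊢
      rw [hk3 k hk]
      have hcs : pvCntS ((w, l) :: t) k = (if k = w ∧ l = "spam" then 1 else 0) + pvCntS t k := by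
        unfold pvCntS
        rw [List.filter_cons]
        by_cases hkw : k = w
        · subst hkw
          by_cases hls : l = "spam" <;> simp [hls, Nat.add_comm]
        · have hwk : w ≠ k := Ne.symm hkw
          by_cases hls : l = "spam" <;> simp [hwk, hkw, hls]
      have hch : pvCntH ((w, l) :: t) k = (if k = w ∧ l ≠ "spam" then 1 else 0) + pvCntH t k := by
        unfold pvCntH
        rw [List.filter_cons]
        by_cases hkw : k = w
        · subst hkw
          by_cases hls : l = "spam" <;> simp [hls, Nat.add_comm]
        · have hwk : w ≠ k := Ne.symm hkw
          by_cases hls : l = "spam" <;> simp [hwk, hkw, hls]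
      rw [hcs, hch]
      by_cases hkw : k = w <;> by_cases hls : l = "spam" <;>
        simp [hs', hh', hkw, hls] <;> ring_nf

-- B's split pass produces the per-class flattened word streams
lemma pvB_split (emails : List (String × String)) :
    ∀ (a b : List String),
    emails.foldl (fun (p : List String × List String) el =>
        let ws := PySem.Str.split₀ (PySem.Str.lower el.1)
        if el.2 == "spam" then (p.1 ++ ws, p.2) else (p.1, p.2 ++ ws)) (a, b)
      = (a ++ emails.flatMap (fun el => if el.2 == "spam" then pvWords el else []),
         b ++ emails.flatMap (fun el => if el.2 == "spam" then [] else pvWords el)) := by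
  induction emails with
  | nil => intro a b; simp
  | cons el t ih =>
    intro a b
    simp only [List.foldl_cons, List.flatMap_cons]
    by_cases hl : (el.2 == "spam")
    · rw [if_pos hl, ih]
      simp [hl, pvWords, List.append_assoc]
    · rw [if_neg hl, ih]
      simp [hl, pvWords, List.append_assoc]

-- stream projections and counts
lemma pvS_cons (el : String × String) (t : List (String × String)) :
    pvS (el :: t) = ((pvWords el).map (fun w => (w, el.2))) ++ pvS t := by
  simp [pvS]

lemma pvS_map_fst (emails : List (String × String)) :
    (pvS emails).map Prod.fst = emails.flatMap pvWords := by
  induction emails with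
  | nil => rfl
  | cons el t ih =>
    rw [pvS_cons, List.map_append, ih, List.flatMap_cons, List.map_map]
    congr 1
    simp [Function.comp_def]

-- count of one email's contribution to the stream, spam / ham side
lemma pvCnt_one_spam (ws : List String) (l k : String) :
    pvCntS (ws.map (fun w => (w, l))) k
      = (if (l == "spam") = true then ws else []).count k := by
  unfold pvCntS
  rw [List.filter_map]
  by_cases hl : (l == "spam")
  · simp [hl, Function.comp_def, List.count_eq_countP, List.countP_eq_length_filter]
  · simp [hl, Function.comp_def]

lemma pvCnt_one_ham (ws : List String) (l k : String) :
    pvCntH (ws.map (fun w => (w, l))) k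
      = (if (l == "spam") = true then [] else ws).count k := by
  unfold pvCntH
  rw [List.filter_map]
  by_cases hl : (l == "spam")
  · simp [hl, Function.comp_def]
  · simp [hl, Function.comp_def, List.count_eq_countP, List.countP_eq_length_filter]

lemma pvCntS_append (a b : List (String × String)) (k : String) :
    pvCntS (a ++ b) k = pvCntS a k + pvCntS b k := by
  simp [pvCntS, List.filter_append]

lemma pvCntH_append (a b : List (String × String)) (k : String) :
    pvCntH (a ++ b) k = pvCntH a k + pvCntH b k := by
  simp [pvCntH, List.filter_append]

lemma pvCntS_eq (emails : List (String × String)) (k : String) :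
    pvCntS (pvS emails) k
      = (emails.flatMap (fun el => if el.2 == "spam" then pvWords el else [])).count k := by
  induction emails with
  | nil => rfl
  | cons el t ih =>
    rw [pvS_cons, pvCntS_append, ih, pvCnt_one_spam, List.flatMap_cons, List.count_append]

lemma pvCntH_eq (emails : List (String × String)) (k : String) :
    pvCntH (pvS emails) k
      = (emails.flatMap (fun el => if el.2 == "spam" then [] else pvWords el)).count k := by
  induction emails with
  | nil => rfl
  | cons el t ih =>
    rw [pvS_cons, pvCntH_append, ih, pvCnt_one_ham, List.flatMap_cons, List.count_append]

-- ===== VERDICT (by name: the statement is the Claim_ definition above) =====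
theorem create_bag_of_words_spec : Claim_equal_create_bag_of_words := by
  intro emails _
  unfold Spec_create_bag_of_words create_bag_of_words create_bag_of_words_alt
  rw [pvA_flatten emails PySem.Dict.empty []]
  rw [pvB_split emails [] []]
  simp only [List.nil_append]
  obtain ⟨hkeys, hnodup, hval⟩ := pv_main (pvS emails) PySem.Dict.empty
      (fun _ => 0) (fun _ => 0)
      (by simp [PySem.Dict.keys_empty])
      (by intro k hk; simp [PySem.Dict.contains_empty] at hk)
      (by intro k _; exact ⟨rfl, rfl⟩)
  refine Prod.ext ?_ (by simp)
  simp only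
  rw [PySem.Dict.items_eq_map_keys _ hnodup []]
  rw [hkeys, PySem.Dict.keys_empty, PySem.Set.update_nil_left, pvS_map_fst]
  rw [PySem.List.dedup_eq_ofList]
  apply List.map_congr_left
  intro k hk
  have hmem : k ∈ (pvS emails).map Prod.fst := by
    rw [pvS_map_fst]
    exact (PySem.Set.mem_ofList _ _).1 hk
  have hcont : ((pvS emails).foldl pvStep PySem.Dict.empty).contains k = true := by
    refine (PySem.Dict.contains_iff_mem_keys _ k).2 ?_
    rw [hkeys, PySem.Dict.keys_empty, PySem.Set.update_nil_left]
    exact (PySem.Set.mem_ofList _ _).2 hmem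
  rw [hval k hcont]
  rw [PySem.Dict.getD_foldl_insert_add_one, PySem.Dict.getD_foldl_insert_add_one]
  rw [pvCntS_eq, pvCntH_eq]
  simp [PySem.Dict.getD_empty, pvWords]
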